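-- pv_equiv track=rewrite | github.com/danilospi/artificial-intelligence-project | equitable_graph_coloring.py | fixColorNumber
-- ===== SOURCE A (Python) =====
-- def fixColorNumber(coloring):
--     sort_by_color = sorted(coloring, key=lambda tup: tup[1])
--     i = 0
--     tmp = sort_by_color[0][1]
--     individual = []
--     for vtx, col in sort_by_color:
--         if (tmp != col):
--             i += 1
--             tmp = col
--         individual.append((vtx, i))
--     individual = sorted(individual, key=lambda tup: tup[0])
--     return individual
-- ===== SOURCE B (Python) =====
-- def fixColorNumber(coloring):
--     # rank table: each distinct color -> its index among the sorted distinct colors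
--     colors = sorted(set(col for _, col in coloring))
--     rank = {c: r for r, c in enumerate(colors)}
--     return sorted((vtx, rank[col]) for vtx, col in coloring)
-- ===== Notes on version B (the rewrite author's own statement) =====
-- stated objective: idiomatic
-- what changed: Replaces the sort-then-running-counter change-detection scan (plus a second stable sort back to vertex order) by a precomputed rank table over the sorted distinct colors and a single mapping pass, then one sort of the resulting pairs.
-- outside the precondition, e.g. on fixColorNumber([]): A raises IndexError, B returns []
-- crash fix: On the empty list A raises IndexError (it reads sort_by_color[0][1]) while B returns []. — e.g. on fixColorNumber([]): A raises IndexError, B returns []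
import Mathlib
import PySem

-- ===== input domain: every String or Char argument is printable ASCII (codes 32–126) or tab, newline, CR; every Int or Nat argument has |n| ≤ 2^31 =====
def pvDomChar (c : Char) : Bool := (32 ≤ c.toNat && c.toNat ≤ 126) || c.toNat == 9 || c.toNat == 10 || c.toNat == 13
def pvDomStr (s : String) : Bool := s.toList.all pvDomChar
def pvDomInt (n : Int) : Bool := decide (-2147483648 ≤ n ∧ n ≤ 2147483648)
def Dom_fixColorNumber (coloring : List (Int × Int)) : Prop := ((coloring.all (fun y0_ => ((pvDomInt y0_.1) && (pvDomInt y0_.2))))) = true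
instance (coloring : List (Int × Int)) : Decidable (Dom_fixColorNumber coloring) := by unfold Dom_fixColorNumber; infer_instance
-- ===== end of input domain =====

-- B replaces A's sort+running-counter renumbering pass (and second stable sort) by a rank
-- table over the sorted distinct colors and a single mapping pass (objective: idiomatic).

-- ===== PORT A =====
-- loop body of A's for-loop, on the state (i, tmp, individual)
def stepA (s : Int × Int × List (Int × Int)) (p : Int × Int) : Int × Int × List (Int × Int) :=
  if s.2.1 ≠ p.2 then (s.1 + 1, p.2, s.2.2 ++ [(p.1, s.1 + 1)])
  else (s.1, s.2.1, s.2.2 ++ [(p.1, s.1)])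

def fixColorNumber (coloring : List (Int × Int)) : List (Int × Int) :=
  let sort_by_color := PySem.List.sorted coloring (fun tup => tup.2) false
  -- tmp = sort_by_color[0][1]; total form pyGetD, exact under Pre_ (coloring nonempty)
  let tmp := (PySem.List.pyGetD sort_by_color 0 ((0 : Int), (0 : Int))).2
  let st := sort_by_color.foldl stepA ((0 : Int), tmp, ([] : List (Int × Int)))
  PySem.List.sorted st.2.2 (fun tup => tup.1) false

-- ===== PORT B =====
def fixColorNumber_alt (coloring : List (Int × Int)) : List (Int × Int) :=
  let colors := PySem.List.sorted (PySem.Set.ofList (coloring.map (fun p => p.2))) (fun c => c) false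
  let rank := (PySem.List.enumerate colors 0).foldl
      (fun d rc => PySem.Dict.insert d rc.2 rc.1) (PySem.Dict.empty : PySem.Dict Int Int)
  PySem.List.sorted2 (coloring.map (fun p => (p.1, PySem.Dict.getD rank p.2 0)))
    (fun t => t.1) (fun t => t.2) false

-- ===== PRECONDITION & SPEC =====
-- Pre_ excludes only the empty list, on which A raises IndexError (sort_by_color[0][1]).
def Pre_fixColorNumber (coloring : List (Int × Int)) : Prop := coloring ≠ []
instance (coloring : List (Int × Int)) : Decidable (Pre_fixColorNumber coloring) := by
  unfold Pre_fixColorNumber; infer_instance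
def pvWitness_fixColorNumber : (List (Int × Int)) := [(1, 2)]

-- On the empty list A raises IndexError (it reads sort_by_color[0][1]) while B returns [].
def Raises_fixColorNumber (coloring : List (Int × Int)) : Prop := coloring = []
instance (coloring : List (Int × Int)) : Decidable (Raises_fixColorNumber coloring) := by
  unfold Raises_fixColorNumber; infer_instance
def pvRaiseWitness_fixColorNumber : (List (Int × Int)) := []
def pvRaiseWitnessOut_fixColorNumber : List (Int × Int) := []

def Spec_fixColorNumber (coloring : List (Int × Int)) (out : List (Int × Int)) : Prop :=
  out = fixColorNumber_alt coloring
instance (coloring : List (Int × Int)) (out : List (Int × Int)) : Decidable (Spec_fixColorNumber coloring out) := by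
  unfold Spec_fixColorNumber; infer_instance

-- ===== CLAIM (what is proved, stated in full; the proofs are below) =====
def Claim_equal_fixColorNumber : Prop := ∀ (coloring : List (Int × Int)), Dom_fixColorNumber coloring → Pre_fixColorNumber coloring → Spec_fixColorNumber coloring (fixColorNumber coloring)
def Claim_raises_fixColorNumber : Prop := (∀ (coloring : List (Int × Int)), Dom_fixColorNumber coloring → Raises_fixColorNumber coloring → ¬ Pre_fixColorNumber coloring) ∧ (Dom_fixColorNumber (pvRaiseWitness_fixColorNumber) ∧ Raises_fixColorNumber (pvRaiseWitness_fixColorNumber) ∧ fixColorNumber_alt (pvRaiseWitness_fixColorNumber) = pvRaiseWitnessOut_fixColorNumber)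

-- ===== LEMMAS AND PROOFS =====

-- rank of a color c against the distinct-color list D: how many elements of D lie below c
def rnk (D : List Int) (c : Int) : Int := (D.countP (fun d => decide (d < c)) : Int)

def Dof (coloring : List (Int × Int)) : List Int := PySem.Set.ofList (coloring.map (fun p => p.2))

def fmap (coloring : List (Int × Int)) (p : Int × Int) : Int × Int := (p.1, rnk (Dof coloring) p.2)

-- the two insertion orders used by the final sorts: A sorts by the vertex only, B by the pair
def bA (a b : Int × Int) : Bool := decide (a.1 < b.1)
def bB (a b : Int × Int) : Bool := decide (a.1 < b.1) || (!decide (b.1 < a.1) && decide (a.2 < b.2))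
def Rle (a b : Int × Int) : Prop := bB b a = false

lemma sortedA_eq (xs : List (Int × Int)) :
    PySem.List.sorted xs (fun t => t.1) false = xs.foldl (fun acc x => PySem.List.insertBy bA x acc) [] := rfl

lemma sortedB_eq (xs : List (Int × Int)) :
    PySem.List.sorted2 xs (fun t => t.1) (fun t => t.2) false
      = xs.foldl (fun acc x => PySem.List.insertBy bB x acc) [] := rfl

lemma countP_le_eq (D : List Int) (hD : D.Nodup) (tmp : Int) (h : tmp ∈ D) :
    D.countP (fun d => decide (d ≤ tmp)) = D.countP (fun d => decide (d < tmp)) + 1 := by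
  have hperm : D.Perm (tmp :: D.erase tmp) := List.perm_cons_erase h
  rw [List.Perm.countP_eq _ hperm, List.Perm.countP_eq _ hperm]
  have he : (D.erase tmp).countP (fun d => decide (d ≤ tmp))
      = (D.erase tmp).countP (fun d => decide (d < tmp)) := by
    apply List.countP_congr
    intro d hd
    have hne : d ≠ tmp := ((hD.mem_erase_iff).mp hd).1
    simp only [decide_eq_true_eq]
    omega
  rw [List.countP_cons, List.countP_cons, he]
  simp

lemma runnerA (D : List Int) (hD : D.Nodup) :
    ∀ (ys : List (Int × Int)) (i tmp : Int) (acc : List (Int × Int)),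
    ys.Pairwise (fun a b => a.2 ≤ b.2) →
    (∀ p ∈ ys, tmp ≤ p.2) →
    (∀ p ∈ ys, p.2 ∈ D) →
    tmp ∈ D →
    i = rnk D tmp →
    (∀ d ∈ D, d ≤ tmp ∨ ∃ p ∈ ys, d = p.2) →
    (ys.foldl stepA (i, tmp, acc)).2.2 = acc ++ ys.map (fun p => (p.1, rnk D p.2)) := by
  intro ys
  induction ys with
  | nil => intro i tmp acc _ _ _ _ _ _; simp
  | cons p t ih =>
    intro i tmp acc hpw h2 hmemD htmpD hi h4
    have hpt : ∀ q ∈ t, p.2 ≤ q.2 := (List.pairwise_cons.mp hpw).1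
    have hpw' := (List.pairwise_cons.mp hpw).2
    rw [List.foldl_cons]
    by_cases htp : tmp = p.2
    · have hstep : stepA (i, tmp, acc) p = (i, tmp, acc ++ [(p.1, i)]) := by
        simp [stepA, htp]
      rw [hstep, ih i tmp (acc ++ [(p.1, i)]) hpw'
          (fun q hq => le_trans (le_of_eq htp) (hpt q hq))
          (fun q hq => hmemD q (List.mem_cons_of_mem _ hq)) htmpD hi
          (fun d hd => by
            rcases h4 d hd with hle | ⟨q, hq, hdq⟩
            · exact Or.inl hle
            · rcases List.mem_cons.mp hq with rfl | hqt
              · exact Or.inl (le_of_eq (by rw [hdq, ← htp]))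
              · exact Or.inr ⟨q, hqt, hdq⟩)]
      have hip : i = rnk D p.2 := by rw [hi, htp]
      simp [hip]
    · have hle : tmp ≤ p.2 := h2 p (List.mem_cons_self)
      have hlt : tmp < p.2 := lt_of_le_of_ne hle htp
      have hstep : stepA (i, tmp, acc) p = (i + 1, p.2, acc ++ [(p.1, i + 1)]) := by
        simp [stepA, htp]
      have hrnk : rnk D p.2 = i + 1 := by
        have e1 : D.countP (fun d => decide (d < p.2)) = D.countP (fun d => decide (d ≤ tmp)) := by
          apply List.countP_congr
          intro d hd
          rcases h4 d hd with hle' | ⟨q, hq, hdq⟩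
          · simp only [decide_eq_true_eq]; omega
          · rcases List.mem_cons.mp hq with rfl | hqt
            · simp only [decide_eq_true_eq]; omega
            · have := hpt q hqt
              simp only [decide_eq_true_eq]; omega
        unfold rnk at hi ⊢
        rw [e1, countP_le_eq D hD tmp htmpD]
        push_cast
        omega
      rw [hstep, ih (i + 1) p.2 (acc ++ [(p.1, i + 1)]) hpw' hpt
          (fun q hq => hmemD q (List.mem_cons_of_mem _ hq))
          (hmemD p (List.mem_cons_self)) hrnk.symm
          (fun d hd => by
            rcases h4 d hd with hle' | ⟨q, hq, hdq⟩
            · exact Or.inl (le_trans hle' hle)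
            · rcases List.mem_cons.mp hq with rfl | hqt
              · exact Or.inl (le_of_eq hdq)
              · exact Or.inr ⟨q, hqt, hdq⟩)]
      simp [hrnk]

-- unfolding of insertBy on a cons cell
lemma insertBy_cons {α : Type} (b : α → α → Bool) (x y : α) (ys : List α) :
    PySem.List.insertBy b x (y :: ys)
      = if b x y then x :: y :: ys else y :: PySem.List.insertBy b x ys := by
  simp [PySem.List.insertBy]

lemma insertBy_congr {α : Type} (b1 b2 : α → α → Bool) (x : α) :
    ∀ (acc : List α), (∀ y ∈ acc, b1 x y = b2 x y) →
    PySem.List.insertBy b1 x acc = PySem.List.insertBy b2 x acc := by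
  intro acc
  induction acc with
  | nil => intro _; rfl
  | cons y ys ih =>
    intro h
    have hxy := h y (List.mem_cons_self)
    rw [insertBy_cons, insertBy_cons, hxy]
    split_ifs with hb
    · rfl
    · rw [ih (fun y' hy' => h y' (List.mem_cons_of_mem _ hy'))]

lemma foldIns_congr :
    ∀ (zs acc : List (Int × Int)),
    zs.Pairwise (fun a b => a.2 ≤ b.2) → (∀ y ∈ acc, ∀ x ∈ zs, y.2 ≤ x.2) →
    zs.foldl (fun acc x => PySem.List.insertBy bA x acc) acc
      = zs.foldl (fun acc x => PySem.List.insertBy bB x acc) acc := by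
  intro zs
  induction zs with
  | nil => intro acc _ _; rfl
  | cons x t ih =>
    intro acc hpw hle
    have h1 : PySem.List.insertBy bA x acc = PySem.List.insertBy bB x acc := by
      apply insertBy_congr
      intro y hy
      have hyx : y.2 ≤ x.2 := hle y hy x (List.mem_cons_self)
      have hxy : ¬ x.2 < y.2 := not_lt.mpr hyx
      simp [bA, bB, hxy]
    rw [List.foldl_cons, List.foldl_cons, h1]
    apply ih
    · exact (List.pairwise_cons.mp hpw).2
    · intro y hy z hz
      rcases (PySem.List.mem_insertBy _ _ _ _).mp hy with rfl | hy'
      · exact (List.pairwise_cons.mp hpw).1 z hz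
      · exact hle y hy' z (List.mem_cons_of_mem _ hz)

lemma bB_iff (a b : Int × Int) : bB a b = true ↔ (a.1 < b.1 ∨ (¬ (b.1 < a.1) ∧ a.2 < b.2)) := by
  simp [bB]

lemma bB_false_iff (a b : Int × Int) : bB a b = false ↔ ¬ (a.1 < b.1 ∨ (¬ (b.1 < a.1) ∧ a.2 < b.2)) := by
  rw [← bB_iff]
  simp

lemma bB_asymm {x y : Int × Int} (h : bB x y = true) : bB y x = false := by
  rw [bB_iff] at h
  rw [bB_false_iff]
  omega

lemma bB_negtrans {x y z : Int × Int} (hzy : bB z y = false) (hxy : bB x y = true) :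
    bB z x = false := by
  rw [bB_false_iff] at hzy ⊢
  rw [bB_iff] at hxy
  omega

lemma insertBy_pairwise (x : Int × Int) :
    ∀ acc : List (Int × Int), acc.Pairwise Rle → (PySem.List.insertBy bB x acc).Pairwise Rle := by
  intro acc
  induction acc with
  | nil => intro _; exact List.pairwise_singleton _ _
  | cons y ys ih =>
    intro hpw
    rcases List.pairwise_cons.mp hpw with ⟨hy, hys⟩
    by_cases hb : bB x y = true
    · rw [insertBy_cons, if_pos hb]
      refine List.pairwise_cons.mpr ⟨?_, hpw⟩
      intro w hw
      rcases List.mem_cons.mp hw with rfl | hwys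
      · exact bB_asymm hb
      · exact bB_negtrans (hy w hwys) hb
    · have hb' : bB x y = false := eq_false_of_ne_true hb
      rw [insertBy_cons, if_neg hb]
      refine List.pairwise_cons.mpr ⟨?_, ih hys⟩
      intro w hw
      rcases (PySem.List.mem_insertBy _ _ _ _).mp hw with rfl | hwys
      · exact hb'
      · exact hy w hwys

lemma fold_pairwise :
    ∀ (zs acc : List (Int × Int)), acc.Pairwise Rle →
    (zs.foldl (fun a x => PySem.List.insertBy bB x a) acc).Pairwise Rle := by
  intro zs
  induction zs with
  | nil => intro acc h; exact h
  | cons x t ih =>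
    intro acc h
    rw [List.foldl_cons]
    exact ih _ (insertBy_pairwise x acc h)

lemma Rle_antisymm {a b : Int × Int} (h1 : Rle a b) (h2 : Rle b a) : a = b := by
  obtain ⟨a1, a2⟩ := a; obtain ⟨b1, b2⟩ := b
  unfold Rle at h1 h2
  rw [bB_false_iff] at h1 h2
  simp only [Prod.mk.injEq]
  constructor <;> omega

lemma getD_fold_skip :
    ∀ (ps : List (Int × Int)) (d0 : PySem.Dict Int Int) (c : Int),
    (∀ p ∈ ps, p.2 ≠ c) →
    PySem.Dict.getD (ps.foldl (fun d rc => PySem.Dict.insert d rc.2 rc.1) d0) c 0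
      = PySem.Dict.getD d0 c 0 := by
  intro ps
  induction ps with
  | nil => intro d0 c _; rfl
  | cons p t ih =>
    intro d0 c h
    rw [List.foldl_cons, ih _ c (fun q hq => h q (List.mem_cons_of_mem _ hq)),
      PySem.Dict.getD_insert_of_ne _ _ _ (Ne.symm (h p (List.mem_cons_self)))]

lemma getD_fold_enum :
    ∀ (cs : List Int) (s : Int) (d0 : PySem.Dict Int Int) (c : Int),
    cs.Pairwise (· < ·) → c ∈ cs →
    PySem.Dict.getD ((PySem.List.enumerate cs s).foldl
        (fun d rc => PySem.Dict.insert d rc.2 rc.1) d0) c 0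
      = s + (cs.countP (fun d => decide (d < c)) : Int) := by
  intro cs
  induction cs with
  | nil => intro s d0 c _ hc; exact absurd hc (by simp)
  | cons a t ih =>
    intro s d0 c hpw hc
    rcases List.pairwise_cons.mp hpw with ⟨ha, hpt⟩
    rw [PySem.List.enumerate_cons, List.foldl_cons]
    by_cases hca : c = a
    · subst hca
      have hskip : ∀ p ∈ PySem.List.enumerate t (s + 1), p.2 ≠ c := by
        intro p hp
        have hp2 : p.2 ∈ t := by
          have hmap := PySem.List.map_snd_enumerate t (s + 1)
          rw [← hmap]
          exact List.mem_map_of_mem hp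
        have := ha p.2 hp2
        omega
      rw [getD_fold_skip _ _ _ hskip, PySem.Dict.getD_insert_self]
      have h0 : (c :: t).countP (fun d => decide (d < c)) = 0 := by
        rw [List.countP_eq_zero]
        intro b hb
        rcases List.mem_cons.mp hb with rfl | hbt
        · simp
        · have := ha b hbt
          simp only [decide_eq_true_eq]
          omega
      rw [h0]
      simp
    · have hct : c ∈ t := (List.mem_cons.mp hc).resolve_left hca
      rw [ih (s + 1) _ c hpt hct]
      have hcnt : (a :: t).countP (fun d => decide (d < c)) = t.countP (fun d => decide (d < c)) + 1 := by
        rw [List.countP_cons]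
        have := ha c hct
        simp [this]
      rw [hcnt]
      push_cast
      ring

lemma fixA_unfold (coloring : List (Int × Int)) :
    fixColorNumber coloring
      = PySem.List.sorted (((PySem.List.sorted coloring (fun tup => tup.2) false).foldl stepA
          ((0 : Int),
           (PySem.List.pyGetD (PySem.List.sorted coloring (fun tup => tup.2) false) 0 ((0 : Int), (0 : Int))).2,
           ([] : List (Int × Int)))).2.2) (fun tup => tup.1) false := rfl

lemma fixB_unfold (coloring : List (Int × Int)) :
    fixColorNumber_alt coloring
      = PySem.List.sorted2 (coloring.map (fun p => (p.1,
          PySem.Dict.getD ((PySem.List.enumerate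
              (PySem.List.sorted (PySem.Set.ofList (coloring.map (fun p => p.2))) (fun c => c) false) 0).foldl
            (fun d rc => PySem.Dict.insert d rc.2 rc.1) (PySem.Dict.empty : PySem.Dict Int Int)) p.2 0)))
        (fun t => t.1) (fun t => t.2) false := rfl

lemma main_eq (coloring : List (Int × Int)) (hpre : coloring ≠ []) :
    fixColorNumber coloring = fixColorNumber_alt coloring := by
  have hD : (Dof coloring).Nodup := PySem.Set.nodup_ofList _
  -- A side: peel the head of the colour-sorted list
  have hne : PySem.List.sorted coloring (fun tup => tup.2) false ≠ [] := by
    rw [Ne, PySem.List.sorted_eq_nil_iff]; exact hpre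
  obtain ⟨m, t, hmt⟩ := List.exists_cons_of_ne_nil hne
  have hmemcol : ∀ p ∈ m :: t, p ∈ coloring := by
    intro p hp
    have hmem : p ∈ PySem.List.sorted coloring (fun tup => tup.2) false := by rw [hmt]; exact hp
    exact (PySem.List.mem_sorted _ _ _ _).mp hmem
  have hhead : ∀ y ∈ coloring, m.2 ≤ y.2 := PySem.List.key_head_sorted_le _ _ hmt
  have hmemD : ∀ p ∈ m :: t, p.2 ∈ Dof coloring := fun p hp =>
    (PySem.Set.mem_ofList _ _).mpr (List.mem_map_of_mem (hmemcol p hp))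
  have hmD : m.2 ∈ Dof coloring := hmemD m (List.mem_cons_self)
  have hz : (0 : Int) = rnk (Dof coloring) m.2 := by
    unfold rnk
    have h0 : (Dof coloring).countP (fun d => decide (d < m.2)) = 0 := by
      rw [List.countP_eq_zero]
      intro d hd
      obtain ⟨q, hq, rfl⟩ := List.mem_map.mp ((PySem.Set.mem_ofList _ _).mp hd)
      have := hhead q hq
      simp only [decide_eq_true_eq]
      omega
    simp [h0]
  have hpwS : (m :: t).Pairwise (fun a b => a.2 ≤ b.2) := by
    have h0 : (PySem.List.sorted coloring (fun tup => tup.2) false).Pairwise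
        (fun a b => a.2 ≤ b.2) := PySem.List.sorted_pairwise coloring (fun tup => tup.2)
    rw [hmt] at h0
    exact h0
  have hrun := runnerA (Dof coloring) hD (m :: t) 0 m.2 []
    hpwS
    (fun p hp => hhead p (hmemcol p hp))
    hmemD hmD hz
    (fun d hd => Or.inr (by
      obtain ⟨q, hq, rfl⟩ := List.mem_map.mp ((PySem.Set.mem_ofList _ _).mp hd)
      refine ⟨q, ?_, rfl⟩
      rw [← hmt]
      exact (PySem.List.mem_sorted _ _ _ _).mpr hq))
  simp only [List.nil_append] at hrun
  have hA : fixColorNumber coloring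
      = PySem.List.sorted ((m :: t).map (fmap coloring)) (fun tup => tup.1) false := by
    rw [fixA_unfold, hmt, PySem.List.pyGetD_zero_cons, hrun]
    rfl
  -- the mapped list is still sorted on the second component
  have hpwM : ((m :: t).map (fmap coloring)).Pairwise (fun a b => a.2 ≤ b.2) := by
    refine List.Pairwise.map (fmap coloring) ?_ hpwS
    intro a b hab
    show rnk (Dof coloring) a.2 ≤ rnk (Dof coloring) b.2
    have hc : (Dof coloring).countP (fun d => decide (d < a.2))
        ≤ (Dof coloring).countP (fun d => decide (d < b.2)) := by
      apply List.countP_mono_left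
      intro d hd hdlt
      simp only [decide_eq_true_eq] at hdlt ⊢
      omega
    unfold rnk
    exact_mod_cast hc
  have hAB2 : PySem.List.sorted ((m :: t).map (fmap coloring)) (fun tup => tup.1) false
      = PySem.List.sorted2 ((m :: t).map (fmap coloring)) (fun t => t.1) (fun t => t.2) false := by
    rw [sortedA_eq, sortedB_eq]
    exact foldIns_congr _ [] hpwM (by intro y hy; simp at hy)
  -- B side: the rank-table lookup computes rnk
  have hBmap : coloring.map (fun p => (p.1,
        PySem.Dict.getD ((PySem.List.enumerate
            (PySem.List.sorted (PySem.Set.ofList (coloring.map (fun p => p.2))) (fun c => c) false) 0).foldl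
          (fun d rc => PySem.Dict.insert d rc.2 rc.1) (PySem.Dict.empty : PySem.Dict Int Int)) p.2 0))
      = coloring.map (fmap coloring) := by
    apply List.map_congr_left
    intro p hp
    have hp2 : p.2 ∈ PySem.List.sorted (PySem.Set.ofList (coloring.map (fun p => p.2))) (fun c => c) false :=
      (PySem.List.mem_sorted _ _ _ _).mpr ((PySem.Set.mem_ofList _ _).mpr (List.mem_map_of_mem hp))
    rw [getD_fold_enum _ 0 _ _ (PySem.List.sorted_ofList_pairwise_lt _) hp2]
    have hperm : (PySem.List.sorted (PySem.Set.ofList (coloring.map (fun p => p.2))) (fun c => c) false).Perm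
        (PySem.Set.ofList (coloring.map (fun p => p.2))) := PySem.List.sorted_perm _ _ _
    rw [List.Perm.countP_eq _ hperm]
    show _ = fmap coloring p
    unfold fmap rnk Dof
    simp
  have hB : fixColorNumber_alt coloring
      = PySem.List.sorted2 (coloring.map (fmap coloring)) (fun t => t.1) (fun t => t.2) false := by
    rw [fixB_unfold, hBmap]
  -- both sides are lexicographically sorted rearrangements of the same list
  rw [hA, hAB2, hB]
  apply List.Perm.eq_of_pairwise (le := Rle)
  · intro a b _ _ h1 h2
    exact Rle_antisymm h1 h2
  · rw [sortedB_eq]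
    exact fold_pairwise _ [] List.Pairwise.nil
  · rw [sortedB_eq]
    exact fold_pairwise _ [] List.Pairwise.nil
  · have p1 : (PySem.List.sorted2 ((m :: t).map (fmap coloring)) (fun t => t.1) (fun t => t.2) false).Perm
        ((m :: t).map (fmap coloring)) := PySem.List.sorted2_perm _ _ _ _
    have p2 : ((m :: t).map (fmap coloring)).Perm (coloring.map (fmap coloring)) := by
      have hp : (m :: t).Perm coloring := by
        rw [← hmt]
        exact PySem.List.sorted_perm _ _ _
      exact hp.map _
    have p3 : (PySem.List.sorted2 (coloring.map (fmap coloring)) (fun t => t.1) (fun t => t.2) false).Perm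
        (coloring.map (fmap coloring)) := PySem.List.sorted2_perm _ _ _ _
    exact (p1.trans p2).trans p3.symm

-- ===== VERDICT (by name: the statement is the Claim_ definition above) =====
theorem fixColorNumber_spec : Claim_equal_fixColorNumber := by
  intro coloring _ hpre
  exact main_eq coloring hpre

theorem fixColorNumber_raises : Claim_raises_fixColorNumber := by
  unfold Claim_raises_fixColorNumber
  exact ⟨fun c _ hr hp => hp hr, by decide⟩

-- self-check: the raise-witness value asserted above is the one fixColorNumber_alt computes
theorem pvRaiseWitness_ok :
    fixColorNumber_alt pvRaiseWitness_fixColorNumber = pvRaiseWitnessOut_fixColorNumber :=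
  fixColorNumber_raises.2.2.2
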